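-- pv_equiv track=rewrite | github.com/kayo5000/Prosodic | data_generator.py | _build_rhyme_index
-- ===== SOURCE A (Python) =====
-- from collections import defaultdict
-- from typing import Dict, List, Optional, Tuple
--
-- def _rhyme_unit(phonemes: List[str]) -> Tuple[str, ...]:
--     """
--     Extract the rhyme-bearing unit: from the last primary-stressed vowel to end.
--
--     In CMU notation, vowels carry a stress digit (0, 1, 2). We seek the last
--     vowel that carries primary (1) or secondary (2) stress, then return from
--     that phoneme to the end of the sequence.
--
--     Falls back to the last vowel of any stress level if no stressed vowel found.
--     Returns empty tuple if no vowel found at all.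
--     """
--     stressed_indices = [i for i, p in enumerate(phonemes) if p and p[-1] in "12"]
--     if stressed_indices:
--         return tuple(phonemes[stressed_indices[-1]:])
--
--     any_vowel = [i for i, p in enumerate(phonemes) if p and p[-1].isdigit()]
--     if any_vowel:
--         return tuple(phonemes[any_vowel[-1]:])
--
--     return tuple()
--
-- def _build_rhyme_index(cmu: Dict[str, List[List[str]]]) -> Dict[Tuple, List[str]]:
--     """
--     Build a reverse index: rhyme_unit → [words with that rhyme unit].
--
--     Uses only the first pronunciation for each word. Single-phoneme words
--     and very rare units (fewer than 2 words) are excluded.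
--     """
--     index: Dict[Tuple, List[str]] = defaultdict(list)
--     for word, pronunciations in cmu.items():
--         phones = pronunciations[0]
--         ru = _rhyme_unit(phones)
--         if len(ru) >= 1:
--             index[ru].append(word)
--     # Keep only units with at least 2 words (needed to form pairs)
--     return {ru: words for ru, words in index.items() if len(words) >= 2}
-- ===== SOURCE B (Python) =====
-- def _build_rhyme_index(cmu):
--     """Reverse index rhyme_unit -> words, via a single reverse scan per word."""
--     index = {}
--     for word, pronunciations in cmu.items():
--         phones = pronunciations[0]
--         start = None
--         fallback = None
--         for i, p in reversed(list(enumerate(phones))):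
--             if p and p[-1] in "12":
--                 start = i
--                 break
--             if fallback is None and p and p[-1].isdigit():
--                 fallback = i
--         if start is None:
--             start = fallback
--         if start is not None:
--             ru = tuple(phones[start:])
--             index.setdefault(ru, []).append(word)
--     return {ru: words for ru, words in index.items() if len(words) >= 2}
-- ===== Notes on version B (the rewrite author's own statement) =====
-- stated objective: simpler
-- what changed: The helper's two forward filter-comprehensions plus getLast are replaced by a single inlined reverse scan per word that breaks at the first stressed vowel while recording the last any-stress vowel as a fallback.
import Mathlib
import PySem

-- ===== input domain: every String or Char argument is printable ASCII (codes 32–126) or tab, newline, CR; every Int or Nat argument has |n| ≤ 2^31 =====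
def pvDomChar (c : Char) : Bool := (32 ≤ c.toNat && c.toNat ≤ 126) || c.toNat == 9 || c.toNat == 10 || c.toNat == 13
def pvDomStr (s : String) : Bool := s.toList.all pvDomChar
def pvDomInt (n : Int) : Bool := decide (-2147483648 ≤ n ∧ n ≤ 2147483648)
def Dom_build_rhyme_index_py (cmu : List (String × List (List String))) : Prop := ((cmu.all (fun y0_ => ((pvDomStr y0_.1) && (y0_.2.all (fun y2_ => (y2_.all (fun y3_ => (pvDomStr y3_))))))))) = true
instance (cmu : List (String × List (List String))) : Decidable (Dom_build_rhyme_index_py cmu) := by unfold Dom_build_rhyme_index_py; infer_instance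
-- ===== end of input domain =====

-- B replaces the helper's two forward comprehensions with one reverse scan that breaks
-- at the first stressed vowel while recording the last any-stress vowel as a fallback
-- (objective: simpler — one pass per word instead of two full passes plus a helper).

-- ===== PORT A =====
-- `p and p[-1] in "12"` (truthiness of p, then last char in "12")
def pvStressedP (p : String) : Bool :=
  decide (p.toList ≠ []) &&
    (match PySem.Str.pyGet? p (-1) with
     | some c => c == '1' || c == '2'
     | none => false)

-- `p and p[-1].isdigit()`
def pvVowelP (p : String) : Bool :=
  decide (p.toList ≠ []) &&
    (match PySem.Str.pyGet? p (-1) with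
     | some c => PySem.Chars.isdigit c
     | none => false)

def rhyme_unit_py (phonemes : List String) : List String :=
  let stressed := (PySem.List.enumerate phonemes).filter (fun ip => pvStressedP ip.2)
  match stressed.getLast? with
  | some ip => phonemes.drop ip.1.toNat   -- phonemes[i:] with i ≥ 0 (enumerate index) is drop i
  | none =>
    let anyVowel := (PySem.List.enumerate phonemes).filter (fun ip => pvVowelP ip.2)
    match anyVowel.getLast? with
    | some ip => phonemes.drop ip.1.toNat
    | none => []

def build_rhyme_index_py (cmu : List (String × List (List String))) : List (List String × List String) :=
  let index := cmu.foldl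
    (fun (d : PySem.Dict (List String) (List String)) wp =>
      let phones := wp.2.headD []          -- pronunciations[0]; Pre_ guarantees nonempty
      let ru := rhyme_unit_py phones
      if 1 ≤ ru.length then d.modify ru [] (fun ws => ws ++ [wp.1]) else d)  -- defaultdict append
    PySem.Dict.empty
  index.items.filter (fun rw => 2 ≤ rw.2.length)

-- ===== PORT B =====
-- reverse scan with break: first stressed vowel wins, else the fallback (last vowel of any stress)
def pvRevScan : List (Int × String) → Option Int → Option Int
  | [], fb => fb
  | (i, p) :: rest, fb =>
      match p.toList.getLast? with          -- `p and p[-1]`: an empty p has no last char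
      | none => pvRevScan rest fb
      | some c =>
        if c == '1' || c == '2' then some i
        else if fb == none && PySem.Chars.isdigit c then pvRevScan rest (some i)
        else pvRevScan rest fb

def build_rhyme_index_py_alt (cmu : List (String × List (List String))) : List (List String × List String) :=
  let index := cmu.foldl
    (fun (d : PySem.Dict (List String) (List String)) wp =>
      let phones := wp.2.headD []          -- pronunciations[0]; Pre_ guarantees nonempty
      match pvRevScan ((PySem.List.enumerate phones).reverse) none with
      | some i => d.modify (phones.drop i.toNat) [] (fun ws => ws ++ [wp.1])  -- setdefault(ru, []).append(word)
      | none => d)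
    PySem.Dict.empty
  index.items.filter (fun rw => 2 ≤ rw.2.length)

-- ===== PRECONDITION & SPEC =====
-- Pre_ excludes entries whose pronunciation list is empty (A raises IndexError on
-- pronunciations[0]) and association lists with duplicate word keys, which a Python
-- dict argument cannot represent (a dict literal collapses duplicates before the call).
def Pre_build_rhyme_index_py (cmu : List (String × List (List String))) : Prop :=
  (∀ wp ∈ cmu, wp.2 ≠ []) ∧ (cmu.map Prod.fst).Nodup
instance (cmu : List (String × List (List String))) : Decidable (Pre_build_rhyme_index_py cmu) := by unfold Pre_build_rhyme_index_py; infer_instance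

def pvWitness_build_rhyme_index_py : (List (String × List (List String))) :=
  [("cat", [["K", "AE1", "T"]]), ("bat", [["B", "AE1", "T"]])]

def Spec_build_rhyme_index_py (cmu : List (String × List (List String))) (out : List (List String × List String)) : Prop := out = build_rhyme_index_py_alt cmu
instance (cmu : List (String × List (List String))) (out : List (List String × List String)) : Decidable (Spec_build_rhyme_index_py cmu out) := by unfold Spec_build_rhyme_index_py; infer_instance

-- ===== CLAIM (what is proved, stated in full; the proofs are below) =====
def Claim_equal_build_rhyme_index_py : Prop := ∀ (cmu : List (String × List (List String))), Dom_build_rhyme_index_py cmu → Pre_build_rhyme_index_py cmu → Spec_build_rhyme_index_py cmu (build_rhyme_index_py cmu)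

-- ===== LEMMAS AND PROOFS =====
theorem pvStressedP_eq (p : String) :
    pvStressedP p = (match p.toList.getLast? with
                     | some c => c == '1' || c == '2'
                     | none => false) := by
  unfold pvStressedP
  cases h : p.toList.getLast? with
  | none => simp [PySem.List.pyGet?_neg_one, h]
  | some c =>
    have hne : p.toList ≠ [] := by intro e; rw [e] at h; simp at h
    simp [PySem.List.pyGet?_neg_one, h, hne]

theorem pvVowelP_eq (p : String) :
    pvVowelP p = (match p.toList.getLast? with
                  | some c => PySem.Chars.isdigit c
                  | none => false) := by
  unfold pvVowelP
  cases h : p.toList.getLast? with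
  | none => simp [PySem.List.pyGet?_neg_one, h]
  | some c =>
    have hne : p.toList ≠ [] := by intro e; rw [e] at h; simp at h
    simp [PySem.List.pyGet?_neg_one, h, hne]

-- the reverse-scan invariant: the first stressed element of the scan wins, else the
-- fallback, else the first digit-final element of the scan
theorem pvRevScan_eq (r : List (Int × String)) (fb : Option Int) :
    pvRevScan r fb =
      match r.find? (fun ip => pvStressedP ip.2) with
      | some ip => some ip.1
      | none =>
        match fb with
        | some j => some j
        | none => (r.find? (fun ip => pvVowelP ip.2)).map (·.1) := by
  induction r generalizing fb with
  | nil => cases fb <;> simp [pvRevScan]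
  | cons ip rest ih =>
    obtain ⟨i, p⟩ := ip
    cases h : p.toList.getLast? with
    | none =>
      have hs : pvStressedP p = false := by rw [pvStressedP_eq, h]
      have hv : pvVowelP p = false := by rw [pvVowelP_eq, h]
      simp only [pvRevScan, h]
      rw [ih, List.find?_cons_of_neg (by simp [hs]), List.find?_cons_of_neg (by simp [hv])]
    | some c =>
      have hs : pvStressedP p = (c == '1' || c == '2') := by rw [pvStressedP_eq, h]
      have hv : pvVowelP p = PySem.Chars.isdigit c := by rw [pvVowelP_eq, h]
      simp only [pvRevScan, h]
      by_cases h12 : (c == '1' || c == '2') = true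
      · rw [if_pos h12, List.find?_cons_of_pos (by simp [hs, h12])]
      · have h12' : (c == '1' || c == '2') = false := by
          cases e : (c == '1' || c == '2') <;> simp_all
        rw [if_neg (by simp [h12']), List.find?_cons_of_neg (by simp [hs, h12'])]
        cases fb with
        | some j => rw [if_neg (by simp), ih]
        | none =>
          by_cases hd : PySem.Chars.isdigit c = true
          · rw [if_pos (by simp [hd]), ih, List.find?_cons_of_pos (by simp [hv, hd])]
            cases hrest : rest.find? (fun ip => pvStressedP ip.2) <;> simp
          · have hd' : PySem.Chars.isdigit c = false := by
              cases e : PySem.Chars.isdigit c <;> simp_all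
            rw [if_neg (by simp [hd']), ih, List.find?_cons_of_neg (by simp [hv, hd'])]

theorem enum_fst_lt (phones : List String) (ip : Int × String)
    (h : ip ∈ PySem.List.enumerate phones) : ip.1.toNat < phones.length := by
  rw [PySem.List.mem_enumerate_iff] at h
  obtain ⟨k, hk, rfl⟩ := h
  simpa using hk

-- the per-word step of B equals the per-word step of A
theorem pvStep_eq (phones : List String) (d : PySem.Dict (List String) (List String)) (w : String) :
    (match pvRevScan ((PySem.List.enumerate phones).reverse) none with
     | some i => d.modify (phones.drop i.toNat) [] (fun ws => ws ++ [w])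
     | none => d)
    = (let ru := rhyme_unit_py phones
       if 1 ≤ ru.length then d.modify ru [] (fun ws => ws ++ [w]) else d) := by
  rw [pvRevScan_eq]
  simp only [rhyme_unit_py, List.getLast?_filter]
  cases hS : (PySem.List.enumerate phones).reverse.find? (fun ip => pvStressedP ip.2) with
  | some ip =>
    have hmem : ip ∈ PySem.List.enumerate phones := by
      have := List.mem_of_find?_eq_some hS
      simpa using this
    have hlt : ip.1.toNat < phones.length := enum_fst_lt phones ip hmem
    have h1 : 1 ≤ (phones.drop ip.1.toNat).length := by
      rw [List.length_drop]; omega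
    simp
    intro h0
    exact absurd h0 (by omega)
  | none =>
    cases hV : (PySem.List.enumerate phones).reverse.find? (fun ip => pvVowelP ip.2) with
    | some ip =>
      have hmem : ip ∈ PySem.List.enumerate phones := by
        have := List.mem_of_find?_eq_some hV
        simpa using this
      have hlt : ip.1.toNat < phones.length := enum_fst_lt phones ip hmem
      have h1 : 1 ≤ (phones.drop ip.1.toNat).length := by
        rw [List.length_drop]; omega
      simp
      intro h0
      exact absurd h0 (by omega)
    | none => simp

-- ===== VERDICT (by name: the statement is the Claim_ definition above) =====
theorem build_rhyme_index_py_spec : Claim_equal_build_rhyme_index_py := by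
  intro cmu _ _
  unfold Spec_build_rhyme_index_py build_rhyme_index_py build_rhyme_index_py_alt
  have hstep :
      (fun (d : PySem.Dict (List String) (List String)) (wp : String × List (List String)) =>
        let phones := wp.2.headD []
        match pvRevScan ((PySem.List.enumerate phones).reverse) none with
        | some i => d.modify (phones.drop i.toNat) [] (fun ws => ws ++ [wp.1])
        | none => d)
      = (fun (d : PySem.Dict (List String) (List String)) (wp : String × List (List String)) =>
        let phones := wp.2.headD []
        let ru := rhyme_unit_py phones
        if 1 ≤ ru.length then d.modify ru [] (fun ws => ws ++ [wp.1]) else d) := by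
    funext d wp
    exact pvStep_eq (wp.2.headD []) d wp.1
  rw [hstep]
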